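-- pv_equiv track=rewrite | github.com/Klaus0110/100-Days-of-Code | Day 57/IdmMat.py | checkIdempotent
-- ===== SOURCE A (Python) =====
-- def multiply(mat, res):
--     N= len(mat)
--     for i in range(0,N):
--
--         for j in range(0,N):
--
--             res[i][j] = 0
--             for k in range(0,N):
--                 res[i][j] += mat[i][k] * mat[k][j]
--
-- def checkIdempotent(mat):
--     N= len(mat)
--     res =[[0]*N for i in range(0,N)]
--     multiply(mat, res)
--
--     for i in range(0,N):
--         for j in range(0,N):
--             if (mat[i][j] != res[i][j]):
--                 return False
--     return True
-- ===== SOURCE B (Python) =====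
-- def checkIdempotent(mat):
--     n = len(mat)
--     for i, row in enumerate(mat):
--         for j in range(n):
--             if row[j] != sum(mat[k][j] * row[k] for k in range(n)):
--                 return False
--     return True
-- ===== Notes on version B (the rewrite author's own statement) =====
-- stated objective: faster
-- what changed: Drops the multiply helper and the res matrix: one fused pass over cells compares mat[i][j] to the dot product computed inline and returns False at the first mismatch, so non-idempotent inputs skip the rest of the O(n^3) product.
import Mathlib
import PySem

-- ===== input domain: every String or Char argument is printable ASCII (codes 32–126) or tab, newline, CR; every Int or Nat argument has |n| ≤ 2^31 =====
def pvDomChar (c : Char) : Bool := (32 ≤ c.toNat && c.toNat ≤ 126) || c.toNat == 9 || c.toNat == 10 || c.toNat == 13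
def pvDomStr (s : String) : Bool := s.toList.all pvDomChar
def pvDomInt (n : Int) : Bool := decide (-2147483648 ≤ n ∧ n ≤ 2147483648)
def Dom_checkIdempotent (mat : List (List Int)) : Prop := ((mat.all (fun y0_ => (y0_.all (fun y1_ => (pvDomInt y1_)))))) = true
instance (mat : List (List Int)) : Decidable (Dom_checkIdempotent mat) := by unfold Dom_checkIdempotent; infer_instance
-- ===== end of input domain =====

-- B fuses A's build-product and compare passes into one pass over cells (simpler, no res matrix);
-- the equivalence proved is about the return value (A also writes into a local res it builds itself).

-- ===== PORT A =====
-- mat[i][j] (total stand-in for the in-range accesses Pre_ guarantees)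
def pvGet2 (mat : List (List Int)) (i j : Int) : Int :=
  PySem.List.pyGetD (PySem.List.pyGetD mat i []) j 0

-- multiply(mat, res): res[i][j] = sum_k mat[i][k]*mat[k][j]; returned as the matrix it leaves in res
def pvMultiply (mat : List (List Int)) : List (List Int) :=
  let N : Int := mat.length
  (PySem.List.pyRange 0 N 1).map (fun i =>
    (PySem.List.pyRange 0 N 1).map (fun j =>
      (PySem.List.pyRange 0 N 1).foldl (fun acc k => acc + pvGet2 mat i k * pvGet2 mat k j) 0))

def checkIdempotent (mat : List (List Int)) : Bool :=
  let N : Int := mat.length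
  let res := pvMultiply mat
  (PySem.List.pyRange 0 N 1).all (fun i =>
    (PySem.List.pyRange 0 N 1).all (fun j =>
      pvGet2 mat i j == pvGet2 res i j))

-- ===== PORT B =====
def checkIdempotent_alt (mat : List (List Int)) : Bool :=
  let n : Int := mat.length
  (PySem.List.enumerate mat 0).all (fun p =>
    (PySem.List.pyRange 0 n 1).all (fun j =>
      PySem.List.pyGetD p.2 j 0 ==
        (PySem.List.pyRange 0 n 1).foldl
          (fun acc k => acc + pvGet2 mat k j * PySem.List.pyGetD p.2 k 0) 0))

-- ===== PRECONDITION & SPEC =====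
-- Pre_ excludes exactly the ragged inputs (some row shorter than len(mat)) on which Python A raises IndexError.
def Pre_checkIdempotent (mat : List (List Int)) : Prop :=
  ∀ row ∈ mat, mat.length ≤ row.length
instance (mat : List (List Int)) : Decidable (Pre_checkIdempotent mat) := by
  unfold Pre_checkIdempotent; infer_instance
def pvWitness_checkIdempotent : List (List Int) := [[1, 0], [0, 1]]

def Spec_checkIdempotent (mat : List (List Int)) (out : Bool) : Prop := out = checkIdempotent_alt mat
instance (mat : List (List Int)) (out : Bool) : Decidable (Spec_checkIdempotent mat out) := by unfold Spec_checkIdempotent; infer_instance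

-- ===== CLAIM (what is proved, stated in full; the proofs are below) =====
def Claim_equal_checkIdempotent : Prop := ∀ (mat : List (List Int)), Dom_checkIdempotent mat → Pre_checkIdempotent mat → Spec_checkIdempotent mat (checkIdempotent mat)

-- ===== LEMMAS AND PROOFS =====

theorem all_congr_mem {α : Type} (l : List α) (f g : α → Bool)
    (h : ∀ x ∈ l, f x = g x) : l.all f = l.all g := by
  induction l with
  | nil => rfl
  | cons a t ih => simp only [List.all_cons, h a (by simp), ih (fun x hx => h x (by simp [hx]))]

-- the ports agree on every input (Pre_ is only A's raise guard)
theorem ports_agree (mat : List (List Int)) :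
    checkIdempotent mat = checkIdempotent_alt mat := by
  simp only [checkIdempotent, checkIdempotent_alt, pvMultiply]
  rw [PySem.List.enumerate_eq_map_pyRange mat ([] : List Int), List.all_map]
  simp only [PySem.List.len_eq]
  refine all_congr_mem _ _ _ (fun i hi => ?_)
  obtain ⟨hi0, hiN⟩ := (PySem.List.mem_pyRange_one).mp hi
  refine all_congr_mem _ _ _ (fun j hj => ?_)
  obtain ⟨hj0, hjN⟩ := (PySem.List.mem_pyRange_one).mp hj
  rw [show (pvGet2 ((PySem.List.pyRange 0 (mat.length : Int) 1).map fun i =>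
        (PySem.List.pyRange 0 (mat.length : Int) 1).map fun j =>
          (PySem.List.pyRange 0 (mat.length : Int) 1).foldl
            (fun acc k => acc + pvGet2 mat i k * pvGet2 mat k j) 0) i j) =
      (PySem.List.pyRange 0 (mat.length : Int) 1).foldl
        (fun acc k => acc + pvGet2 mat i k * pvGet2 mat k j) 0 from by
    unfold pvGet2
    rw [PySem.List.pyGetD_map_pyRange_of_nonneg _ _ _ _ hi0 hiN,
        PySem.List.pyGetD_map_pyRange_of_nonneg _ _ _ _ hj0 hjN]]
  unfold pvGet2
  congr 1
  exact PySem.List.foldl_congr_mem _ _ _ 0 (fun acc k _ => by dsimp only; ring)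

-- ===== VERDICT (by name: the statement is the Claim_ definition above) =====
theorem checkIdempotent_spec : Claim_equal_checkIdempotent := by
  intro mat _ _
  exact ports_agree mat
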